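-- pv_equiv track=rewrite | github.com/chaeha617/AlgorithmStudy | Juhee_Python/다시 풀어보기/스도쿠 검증.py | solution
-- ===== SOURCE A (Python) =====
-- def solution(a, compare):
--     compare_copy = compare.copy()
--     for i in range(3):
--         for j in range(3):
--             if a[i][j] in compare_copy:
--                 compare_copy.remove(a[i][j])
--
--     if len(compare_copy) == 0:
--         return 1
--     else:
--         return 0
-- ===== SOURCE B (Python) =====
-- def solution(a, compare):
--     # frequency table of the 9 block cells, then a sub-multiset check on compare
--     cells = {}
--     for i in range(3):
--         for j in range(3):
--             v = a[i][j]
--             cells[v] = cells.get(v, 0) + 1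
--     need = {}
--     for v in compare:
--         need[v] = need.get(v, 0) + 1
--     for v in compare:
--         if need[v] > cells.get(v, 0):
--             return 0
--     return 1
-- ===== Notes on version B (the rewrite author's own statement) =====
-- stated objective: alternative
-- what changed: Replaces the per-cell membership-test-and-remove scan on a shrinking copy of compare by two frequency tables (cells and compare) and a single count-comparison pass; no list mutation or repeated linear remove.
import Mathlib
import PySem

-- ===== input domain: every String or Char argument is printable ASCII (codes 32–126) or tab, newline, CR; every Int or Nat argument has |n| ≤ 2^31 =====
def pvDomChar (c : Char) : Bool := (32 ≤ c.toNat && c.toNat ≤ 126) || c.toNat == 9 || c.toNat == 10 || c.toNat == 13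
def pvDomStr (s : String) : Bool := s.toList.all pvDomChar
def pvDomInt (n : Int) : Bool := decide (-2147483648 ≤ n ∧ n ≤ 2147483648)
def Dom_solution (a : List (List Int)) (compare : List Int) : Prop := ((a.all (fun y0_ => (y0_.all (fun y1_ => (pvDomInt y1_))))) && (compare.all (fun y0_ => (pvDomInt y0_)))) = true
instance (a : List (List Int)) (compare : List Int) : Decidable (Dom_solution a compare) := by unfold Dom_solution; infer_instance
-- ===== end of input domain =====

-- B replaces A's membership-test-and-remove scan on a mutable copy of compare by two
-- frequency tables and one count-comparison pass (alternative decomposition, same cost class).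


-- a[i][j] (both Pythons read exactly these cells; default 0 is never used inside Pre_)
def cellA (a : List (List Int)) (i j : Int) : Int :=
  (PySem.List.pyGet? ((PySem.List.pyGet? a i).getD []) j).getD 0

-- ===== PORT A =====
-- 'if a[i][j] in compare_copy: compare_copy.remove(a[i][j])'
def stepA (cc : List Int) (v : Int) : List Int :=
  if cc.contains v then (PySem.List.remove? cc v).getD cc else cc

def solution (a : List (List Int)) (compare : List Int) : Int :=
  let cc := (PySem.List.pyRange 0 3 1).foldl (fun cc i =>
    (PySem.List.pyRange 0 3 1).foldl (fun cc j => stepA cc (cellA a i j)) cc) compare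
  if cc.length == 0 then 1 else 0

-- ===== PORT B =====
def solution_alt (a : List (List Int)) (compare : List Int) : Int :=
  let cells := (PySem.List.pyRange 0 3 1).foldl (fun d i =>
    (PySem.List.pyRange 0 3 1).foldl (fun d j =>
      d.insert (cellA a i j) (d.getD (cellA a i j) 0 + 1)) d) (PySem.Dict.empty : PySem.Dict Int Int)
  let need := compare.foldl (fun d v => d.insert v (d.getD v 0 + 1)) (PySem.Dict.empty : PySem.Dict Int Int)
  if compare.all (fun v => !(need.getD v 0 > cells.getD v 0)) then 1 else 0

-- ===== PRECONDITION & SPEC =====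
-- Pre_ excludes exactly the inputs where A raises IndexError: fewer than 3 rows, or one of
-- the first 3 rows shorter than 3.
def Pre_solution (a : List (List Int)) (compare : List Int) : Prop :=
  3 ≤ a.length ∧ ∀ r ∈ a.take 3, 3 ≤ r.length
instance (a : List (List Int)) (compare : List Int) : Decidable (Pre_solution a compare) := by unfold Pre_solution; infer_instance
def pvWitness_solution : List (List Int) × List Int := ([[1,2,3],[4,5,6],[7,8,9]], [1,5])

def Spec_solution (a : List (List Int)) (compare : List Int) (out : Int) : Prop := out = solution_alt a compare
instance (a : List (List Int)) (compare : List Int) (out : Int) : Decidable (Spec_solution a compare out) := by unfold Spec_solution; infer_instance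

-- ===== CLAIM (what is proved, stated in full; the proofs are below) =====
def Claim_equal_solution : Prop := ∀ (a : List (List Int)) (compare : List Int), Dom_solution a compare → Pre_solution a compare → Spec_solution a compare (solution a compare)

-- ===== LEMMAS AND PROOFS =====

-- the 9 block cells in traversal order
def cellsList (a : List (List Int)) : List Int :=
  [cellA a 0 0, cellA a 0 1, cellA a 0 2,
   cellA a 1 0, cellA a 1 1, cellA a 1 2,
   cellA a 2 0, cellA a 2 1, cellA a 2 2]

lemma count_stepA (cc : List Int) (w v : Int) :
    (stepA cc w).count v = cc.count v - [w].count v := by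
  unfold stepA
  by_cases h : w ∈ cc
  · simp only [List.contains_eq_mem, h, decide_true, if_true,
      PySem.List.remove?_eq_some_erase cc w h]
    by_cases hv : w = v
    · subst hv; simp
    · simp [List.count_erase_of_ne (fun e => hv e.symm), hv]
  · simp only [List.contains_eq_mem, h, decide_false]
    by_cases hv : w = v
    · subst hv
      have : cc.count w = 0 := List.count_eq_zero.mpr h
      simp [this]
    · simp [hv]

lemma count_foldl_stepA (vs : List Int) : ∀ (cc : List Int) (v : Int),
    (vs.foldl stepA cc).count v = cc.count v - vs.count v := by
  induction vs with
  | nil => simp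
  | cons w ws ih =>
    intro cc v
    have h1 := count_stepA cc w v
    have h2 := ih (stepA cc w) v
    simp only [List.foldl_cons, h2, h1]
    by_cases hv : w = v
    · simp [hv]
      omega
    · simp [hv]

lemma foldl_stepA_nil_iff (vs cc : List Int) :
    vs.foldl stepA cc = [] ↔ ∀ v ∈ cc, cc.count v ≤ vs.count v := by
  constructor
  · intro h v hv
    have := count_foldl_stepA vs cc v
    rw [h] at this
    simp at this
    omega
  · intro h
    rw [List.eq_nil_iff_forall_not_mem]
    intro v hv
    have hc : 0 < (vs.foldl stepA cc).count v := List.count_pos_iff.mpr hv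
    rw [count_foldl_stepA] at hc
    by_cases hm : v ∈ cc
    · have := h v hm; omega
    · have : cc.count v = 0 := List.count_eq_zero.mpr hm
      omega

lemma solA_eq (a : List (List Int)) (compare : List Int) :
    solution a compare = (if ((cellsList a).foldl stepA compare).length == 0 then (1:Int) else 0) := by
  have hfold : List.foldl (fun cc i => List.foldl (fun cc j => stepA cc (cellA a i j)) cc (PySem.List.pyRange 0 3 1))
      compare (PySem.List.pyRange 0 3 1) = (cellsList a).foldl stepA compare := by
    rw [show PySem.List.pyRange 0 3 1 = [0, 1, 2] from rfl]
    simp only [List.foldl_cons, List.foldl_nil, cellsList]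
  simp only [solution, hfold]

lemma solB_eq (a : List (List Int)) (compare : List Int) :
    solution_alt a compare
      = (if compare.all (fun v =>
            !(((compare.foldl (fun d v => d.insert v (d.getD v 0 + 1)) (PySem.Dict.empty : PySem.Dict Int Int)).getD v 0)
              > (((cellsList a).foldl (fun d v => d.insert v (d.getD v 0 + 1)) (PySem.Dict.empty : PySem.Dict Int Int)).getD v 0)))
          then 1 else 0) := by
  have hfold : List.foldl (fun d i => List.foldl (fun d j =>
        d.insert (cellA a i j) (d.getD (cellA a i j) 0 + 1)) d (PySem.List.pyRange 0 3 1))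
      (PySem.Dict.empty : PySem.Dict Int Int) (PySem.List.pyRange 0 3 1)
      = (cellsList a).foldl (fun d v => d.insert v (d.getD v 0 + 1)) (PySem.Dict.empty : PySem.Dict Int Int) := by
    rw [show PySem.List.pyRange 0 3 1 = [0, 1, 2] from rfl]
    simp only [List.foldl_cons, List.foldl_nil, cellsList]
  simp only [solution_alt, hfold]

-- ===== VERDICT (by name: the statement is the Claim_ definition above) =====
theorem solution_spec : Claim_equal_solution := by
  intro a compare _ _
  unfold Spec_solution
  rw [solA_eq, solB_eq]
  have hneed : ∀ v : Int,
      (compare.foldl (fun d v => d.insert v (d.getD v 0 + 1)) (PySem.Dict.empty : PySem.Dict Int Int)).getD v 0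
        = (compare.count v : Int) := by
    intro v
    rw [PySem.Dict.getD_foldl_insert_add_one]
    simp [pysem]
  have hcells : ∀ v : Int,
      ((cellsList a).foldl (fun d v => d.insert v (d.getD v 0 + 1)) (PySem.Dict.empty : PySem.Dict Int Int)).getD v 0
        = ((cellsList a).count v : Int) := by
    intro v
    rw [PySem.Dict.getD_foldl_insert_add_one]
    simp [pysem]
  simp only [hneed, hcells]
  have hiff : (((cellsList a).foldl stepA compare).length == 0) = true ↔
      (compare.all fun v => !decide ((compare.count v : Int) > ((cellsList a).count v : Int))) = true := by
    rw [beq_iff_eq, List.length_eq_zero_iff, foldl_stepA_nil_iff, List.all_eq_true]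
    constructor
    · intro h v hv
      have := h v hv
      simp
      exact_mod_cast this
    · intro h v hv
      have := h v hv
      simp at this
      exact_mod_cast this
  rw [Bool.eq_iff_iff.mpr hiff]
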